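-- pv_equiv track=rewrite | github.com/xransum/ascii-explorer | src/ascii_explorer/shared/map.py | _cellular_automata_pass
-- ===== SOURCE A (Python) =====
-- from typing import List, Tuple
--
-- TILE_WALL: str = "#"
--
-- TILE_FLOOR: str = "."
--
-- Grid = List[List[str]]
--
-- def _cellular_automata_pass(grid: Grid) -> Grid:
--     """Single CA smoothing pass.
--
--     Rule: a wall tile becomes floor if it has >= 5 floor neighbours (8-directional).
--     This opens up corners and gives organic edges.
--     """
--     height = len(grid)
--     width = len(grid[0]) if height > 0 else 0
--     new_grid: Grid = [row[:] for row in grid]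
--
--     for row in range(1, height - 1):
--         for col in range(1, width - 1):
--             if grid[row][col] != TILE_WALL:
--                 continue
--             floor_count = 0
--             for dr in (-1, 0, 1):
--                 for dc in (-1, 0, 1):
--                     if dr == 0 and dc == 0:
--                         continue
--                     nr, nc = row + dr, col + dc
--                     if 0 <= nr < height and 0 <= nc < width:
--                         if grid[nr][nc] == TILE_FLOOR:
--                             floor_count += 1
--             if floor_count >= 5:
--                 new_grid[row][col] = TILE_FLOOR
--
--     return new_grid
-- ===== SOURCE B (Python) =====
-- from typing import List
--
-- TILE_WALL: str = "#"
--
-- TILE_FLOOR: str = "."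
--
-- Grid = List[List[str]]
--
-- def _cellular_automata_pass(grid: Grid) -> Grid:
--     """Single CA smoothing pass via a summed-area (2D prefix-sum) table.
--
--     S[r][c] = number of floor tiles grid[i][j] with i < r and j < c, so a
--     rectangle's floor count is a 4-term lookup; for an interior wall cell the
--     3x3 block count equals its 8-neighbour floor count (the wall centre adds 0).
--     """
--     height = len(grid)
--     width = len(grid[0]) if height > 0 else 0
--     S = [[0] * (width + 1)]
--     for row_cells in grid:
--         acc = 0
--         pref = [0]
--         for ch in row_cells[:width]:
--             if ch == TILE_FLOOR:
--                 acc += 1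
--             pref.append(acc)
--         S.append([s + p for s, p in zip(S[-1], pref)])
--
--     new_grid = [row[:] for row in grid]
--     for r in range(1, height - 1):
--         for c in range(1, width - 1):
--             if grid[r][c] != TILE_WALL:
--                 continue
--             cnt = (S[r + 2][c + 2] - S[r - 1][c + 2]
--                    - S[r + 2][c - 1] + S[r - 1][c - 1])
--             if cnt >= 5:
--                 new_grid[r][c] = TILE_FLOOR
--     return new_grid
-- ===== Notes on version B (the rewrite author's own statement) =====
-- stated objective: alternative
-- what changed: B precomputes a summed-area (2D prefix-sum) table of floor tiles once, so each interior wall's 8-neighbour floor count becomes a 4-term table lookup instead of A's per-cell 3x3 scan with bounds checks. Pre_ excludes grids with a real interior (height and width >= 3) in which some row is shorter than the first row: there both programs index past the short rows and whether A returns or raises IndexError depends accidentally on wall placement, while B's summed-area table raises or is truncated.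
import Mathlib
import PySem

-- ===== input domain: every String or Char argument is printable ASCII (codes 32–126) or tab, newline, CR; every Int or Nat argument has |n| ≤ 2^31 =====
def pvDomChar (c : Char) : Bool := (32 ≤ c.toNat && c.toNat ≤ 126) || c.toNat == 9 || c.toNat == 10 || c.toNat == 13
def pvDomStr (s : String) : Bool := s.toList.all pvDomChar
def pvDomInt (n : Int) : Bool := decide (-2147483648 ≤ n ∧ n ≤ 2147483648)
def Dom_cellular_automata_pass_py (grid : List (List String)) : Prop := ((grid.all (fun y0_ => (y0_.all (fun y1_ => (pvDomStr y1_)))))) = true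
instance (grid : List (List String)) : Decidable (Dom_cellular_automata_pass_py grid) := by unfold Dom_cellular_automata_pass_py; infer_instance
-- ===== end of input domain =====

-- B replaces A's per-cell 3x3 neighbour scan by a summed-area (2D prefix-sum) table; return values agree on Pre_.

-- ===== PORT A =====
-- literal transliteration of _cellular_automata_pass (Source A)
def cellular_automata_pass_py (grid : List (List String)) : List (List String) :=
  let height : Int := PySem.List.len grid
  let width : Int := if height > 0 then PySem.List.len (PySem.List.pyGetD grid 0 []) else 0
  let new_grid : List (List String) := grid.map (fun row => PySem.List.slice row none none)
  (PySem.List.pyRange 1 (height - 1) 1).foldl (fun ng row =>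
    (PySem.List.pyRange 1 (width - 1) 1).foldl (fun ng col =>
      if PySem.List.pyGetD (PySem.List.pyGetD grid row []) col "" ≠ "#" then ng
      else
        let floor_count : Int :=
          ([-1, 0, 1] : List Int).foldl (fun fc dr =>
            ([-1, 0, 1] : List Int).foldl (fun fc dc =>
              if dr = 0 ∧ dc = 0 then fc
              else
                if 0 ≤ row + dr ∧ row + dr < height ∧ 0 ≤ col + dc ∧ col + dc < width then
                  if PySem.List.pyGetD (PySem.List.pyGetD grid (row + dr) []) (col + dc) "" = "." then fc + 1
                  else fc
                else fc) fc) 0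
        if floor_count ≥ 5 then
          PySem.List.pySetD ng row (PySem.List.pySetD (PySem.List.pyGetD ng row []) col ".")
        else ng) ng) new_grid

-- ===== PORT B =====
-- B-side helpers: running floor-count prefix of one row, and the table rows (Source B's S, built row by row)
def pvIndFloor (s : String) : Int := if s = "." then 1 else 0

def pvPrefRow (cells : List String) (acc : Int) : List Int :=
  match cells with
  | [] => []
  | ch :: cs =>
      let acc' := acc + pvIndFloor ch
      acc' :: pvPrefRow cs acc'

def pvTable (rows : List (List String)) (w : Nat) (prev : List Int) : List (List Int) :=
  match rows with
  | [] => []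
  | row :: rs =>
      let cur := List.zipWith (· + ·) prev (0 :: pvPrefRow (row.take w) 0)
      cur :: pvTable rs w cur

-- literal transliteration of Source B
def cellular_automata_pass_py_alt (grid : List (List String)) : List (List String) :=
  let height : Int := PySem.List.len grid
  let w : Nat := (grid.headD []).length     -- len(grid[0]) if height > 0 else 0
  let z : List Int := List.replicate (w + 1) 0
  let S : List (List Int) := z :: pvTable grid w z
  let new_grid : List (List String) := grid.map (fun row => PySem.List.slice row none none)
  (PySem.List.pyRange 1 (height - 1) 1).foldl (fun ng r =>
    (PySem.List.pyRange 1 ((w : Int) - 1) 1).foldl (fun ng c =>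
      if PySem.List.pyGetD (PySem.List.pyGetD grid r []) c "" ≠ "#" then ng
      else
        let cnt : Int :=
          PySem.List.pyGetD (PySem.List.pyGetD S (r + 2) []) (c + 2) 0
          - PySem.List.pyGetD (PySem.List.pyGetD S (r - 1) []) (c + 2) 0
          - PySem.List.pyGetD (PySem.List.pyGetD S (r + 2) []) (c - 1) 0
          + PySem.List.pyGetD (PySem.List.pyGetD S (r - 1) []) (c - 1) 0
        if cnt ≥ 5 then
          PySem.List.pySetD ng r (PySem.List.pySetD (PySem.List.pyGetD ng r []) c ".")
        else ng) ng) new_grid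

-- ===== PRECONDITION & SPEC =====
-- Pre_ excludes grids with a real interior (height and width ≥ 3) in which some row is shorter than the
-- first row: there both programs index past the short rows and whether A returns or raises IndexError
-- depends accidentally on wall placement, while B's summed-area table raises or is truncated.
def Pre_cellular_automata_pass_py (grid : List (List String)) : Prop :=
  grid.length ≤ 2 ∨ (grid.headD []).length ≤ 2 ∨ ∀ row ∈ grid, (grid.headD []).length ≤ row.length
instance (grid : List (List String)) : Decidable (Pre_cellular_automata_pass_py grid) := by
  unfold Pre_cellular_automata_pass_py; infer_instance

def pvWitness_cellular_automata_pass_py : List (List String) :=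
  [[".", ".", "."], [".", "#", "."], [".", ".", "."]]

def Spec_cellular_automata_pass_py (grid : List (List String)) (out : List (List String)) : Prop := out = cellular_automata_pass_py_alt grid
instance (grid : List (List String)) (out : List (List String)) : Decidable (Spec_cellular_automata_pass_py grid out) := by unfold Spec_cellular_automata_pass_py; infer_instance

-- ===== CLAIM (what is proved, stated in full; the proofs are below) =====
def Claim_equal_cellular_automata_pass_py : Prop := ∀ (grid : List (List String)), Dom_cellular_automata_pass_py grid → Pre_cellular_automata_pass_py grid → Spec_cellular_automata_pass_py grid (cellular_automata_pass_py grid)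

-- ===== LEMMAS AND PROOFS =====

-- spec-side abbreviations
def pvRowS (row : List String) (m : Nat) : Int := ((row.take m).map pvIndFloor).sum
def pvSC (grid : List (List String)) (a b : Nat) : Int :=
  ((grid.take a).map (fun row => pvRowS row b)).sum

theorem pvPrefRow_length (cells : List String) (acc : Int) :
    (pvPrefRow cells acc).length = cells.length := by
  induction cells generalizing acc with
  | nil => rfl
  | cons ch cs ih => simp [pvPrefRow, ih]

theorem pvPrefRow_get (cells : List String) (acc : Int) (k : Nat) (hk : k < cells.length) :
    (pvPrefRow cells acc)[k]? = some (acc + pvRowS cells (k + 1)) := by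
  induction cells generalizing acc k with
  | nil => simp at hk
  | cons ch cs ih =>
      cases k with
      | zero => simp [pvPrefRow, pvRowS]
      | succ k =>
          have hk' : k < cs.length := by simp at hk; omega
          simp [pvPrefRow, ih _ k hk', pvRowS, List.take_succ_cons, add_assoc]

theorem pvPref_getD (row : List String) (w c : Nat) (hw : w ≤ row.length) (hc : c ≤ w) :
    (0 :: pvPrefRow (row.take w) 0).getD c 0 = pvRowS row c := by
  cases c with
  | zero => simp [pvRowS]
  | succ k =>
      have hlen : (row.take w).length = w := by simp [List.length_take]; omega
      have hk : k < (row.take w).length := by omega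
      have := pvPrefRow_get (row.take w) 0 k hk
      have htt : (row.take w).take (k + 1) = row.take (k + 1) := by
        rw [List.take_take]; congr 1; omega
      simp [List.getD, this, pvRowS, htt]

theorem pvTable_getD (w : Nat) :
    ∀ (rows : List (List String)) (prev : List Int),
      prev.length = w + 1 → (∀ row ∈ rows, w ≤ row.length) →
      ∀ i, i < rows.length → ∀ c, c ≤ w →
        ((pvTable rows w prev).getD i []).getD c 0
          = prev.getD c 0 + ((rows.take (i + 1)).map (fun row => pvRowS row c)).sum := by
  intro rows
  induction rows with
  | nil => intro prev _ _ i hi; simp at hi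
  | cons row rs ih =>
      intro prev hprev hrows i hi c hc
      have hwrow : w ≤ row.length := hrows row (by simp)
      have hpl : (0 :: pvPrefRow (row.take w) 0).length = w + 1 := by
        simp [pvPrefRow_length, List.length_take]; omega
      have hcurlen : (List.zipWith (· + ·) prev (0 :: pvPrefRow (row.take w) 0)).length = w + 1 := by
        simp [List.length_zipWith, hprev, hpl]
      have hcur : ∀ c' ≤ w,
          (List.zipWith (· + ·) prev (0 :: pvPrefRow (row.take w) 0)).getD c' 0
            = prev.getD c' 0 + pvRowS row c' := by
        intro c' hc'
        have h1 : c' < prev.length := by omega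
        have h2 : c' < (0 :: pvPrefRow (row.take w) 0).length := by omega
        have h3 : c' < (List.zipWith (· + ·) prev (0 :: pvPrefRow (row.take w) 0)).length := by omega
        rw [List.getD_eq_getElem _ _ h3, List.getElem_zipWith,
            ← List.getD_eq_getElem _ _ h1, ← List.getD_eq_getElem _ _ h2,
            pvPref_getD row w c' hwrow hc']
      cases i with
      | zero =>
          simp only [pvTable, List.getD_cons_zero, List.take_succ_cons, List.take_zero,
            List.map_cons, List.map_nil, List.sum_cons, List.sum_nil, add_zero, Nat.zero_add]
          exact hcur c hc
      | succ i =>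
          have hi' : i < rs.length := by simpa using hi
          have := ih (List.zipWith (· + ·) prev (0 :: pvPrefRow (row.take w) 0)) hcurlen
            (fun r hr => hrows r (by simp [hr])) i hi' c hc
          simp only [pvTable, List.getD_cons_succ] at this ⊢
          rw [this, hcur c hc, List.take_succ_cons, List.map_cons, List.sum_cons]
          ring

-- table lookup = rectangle prefix count
theorem pvSlook (grid : List (List String)) (w : Nat)
    (hrows : ∀ row ∈ grid, w ≤ row.length) (a c : Nat)
    (ha : a ≤ grid.length) (hc : c ≤ w) :
    ((List.replicate (w + 1) 0 :: pvTable grid w (List.replicate (w + 1) 0)).getD a []).getD c 0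
      = pvSC grid a c := by
  have hz : (List.replicate (w + 1) (0 : Int)).getD c 0 = 0 := by
    by_cases h : c < w + 1
    · rw [List.getD_eq_getElem _ _ (by simpa using h)]; simp
    · rw [List.getD_eq_default]; simp; omega
  cases a with
  | zero => simp only [List.getD_cons_zero, pvSC, List.take_zero, List.map_nil, List.sum_nil] at hz ⊢; exact hz
  | succ i =>
      have hi : i < grid.length := by omega
      have := pvTable_getD w grid (List.replicate (w + 1) 0) (by simp) hrows i hi c hc
      simp only [List.getD_cons_succ] at *
      rw [this, hz, pvSC]; ring

theorem pvSC_succ (grid : List (List String)) (a b : Nat) (ha : a < grid.length) :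
    pvSC grid (a + 1) b = pvSC grid a b + pvRowS (grid.getD a []) b := by
  unfold pvSC
  rw [List.take_add_one]
  have h1 : grid[a]? = some (grid.getD a []) := by
    rw [List.getD_eq_getElem _ _ ha, List.getElem?_eq_getElem ha]
  rw [h1]
  simp

theorem pvRowS_succ (row : List String) (m : Nat) (hm : m < row.length) :
    pvRowS row (m + 1) = pvRowS row m + pvIndFloor (row.getD m "") := by
  unfold pvRowS
  rw [List.take_add_one]
  have h1 : row[m]? = some (row.getD m "") := by
    rw [List.getD_eq_getElem _ _ hm, List.getElem?_eq_getElem hm]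
  rw [h1]
  simp

-- Python double indexing grid[i][j] as a clean Nat-indexed atom
theorem pvGet2 (grid : List (List String)) (i j : Int) (ii jj : Nat)
    (hi : i = (ii : Int)) (hj : j = (jj : Int)) :
    PySem.List.pyGetD (PySem.List.pyGetD grid i []) j ""
      = (grid.getD ii []).getD jj "" := by
  subst hi hj
  rw [PySem.List.pyGetD_natCast, PySem.List.pyGetD_natCast]

theorem pvStep (fc : Int) (x : String) : (if x = "." then fc + 1 else fc) = fc + pvIndFloor x := by
  unfold pvIndFloor; split <;> ring

-- the central fact: for an interior wall cell, A's 8-neighbour scan equals B's 4-term table lookup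
theorem pvCount_eq (grid : List (List String)) (w : Nat)
    (hrows : ∀ row ∈ grid, w ≤ row.length)
    (rn cn : Nat) (hr1 : 1 ≤ rn) (hr2 : rn + 1 < grid.length)
    (hc1 : 1 ≤ cn) (hc2 : cn + 1 < w)
    (hwall : (grid.getD rn []).getD cn "" = "#") :
    (([-1, 0, 1] : List Int).foldl (fun fc dr =>
      ([-1, 0, 1] : List Int).foldl (fun fc dc =>
        if dr = 0 ∧ dc = 0 then fc
        else
          if 0 ≤ (rn : Int) + dr ∧ (rn : Int) + dr < (PySem.List.len grid) ∧
             0 ≤ (cn : Int) + dc ∧ (cn : Int) + dc < (w : Int) then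
            if PySem.List.pyGetD (PySem.List.pyGetD grid ((rn : Int) + dr) []) ((cn : Int) + dc) "" = "."
            then fc + 1 else fc
          else fc) fc) 0)
    = (let z : List Int := List.replicate (w + 1) 0
       let S : List (List Int) := z :: pvTable grid w z
       PySem.List.pyGetD (PySem.List.pyGetD S ((rn : Int) + 2) []) ((cn : Int) + 2) 0
       - PySem.List.pyGetD (PySem.List.pyGetD S ((rn : Int) - 1) []) ((cn : Int) + 2) 0
       - PySem.List.pyGetD (PySem.List.pyGetD S ((rn : Int) + 2) []) ((cn : Int) - 1) 0
       + PySem.List.pyGetD (PySem.List.pyGetD S ((rn : Int) - 1) []) ((cn : Int) - 1) 0) := by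
  have e1 : (rn : Int) + 2 = ((rn + 2 : Nat) : Int) := by push_cast; ring
  have e2 : (rn : Int) - 1 = ((rn - 1 : Nat) : Int) := by omega
  have e3 : (cn : Int) + 2 = ((cn + 2 : Nat) : Int) := by push_cast; ring
  have e4 : (cn : Int) - 1 = ((cn - 1 : Nat) : Int) := by omega
  rw [e1, e2, e3, e4]
  simp only [PySem.List.pyGetD_natCast]
  rw [pvSlook grid w hrows (rn+2) (cn+2) (by omega) (by omega),
      pvSlook grid w hrows (rn-1) (cn+2) (by omega) (by omega),
      pvSlook grid w hrows (rn+2) (cn-1) (by omega) (by omega),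
      pvSlook grid w hrows (rn-1) (cn-1) (by omega) (by omega)]
  have hrl : ∀ i, i < grid.length → w ≤ (grid.getD i []).length := by
    intro i hi
    have hg : grid.getD i [] = grid[i] := List.getD_eq_getElem _ _ hi
    rw [hg]; exact hrows _ (List.getElem_mem hi)
  -- each neighbour step adds the floor indicator of the looked-up cell
  have hstep : ∀ (dr : Int), dr ∈ ([-1, 0, 1] : List Int) →
      ∀ (dc : Int), dc ∈ ([-1, 0, 1] : List Int) → ∀ (fc : Int),
      (if dr = 0 ∧ dc = 0 then fc
       else
         if 0 ≤ (rn : Int) + dr ∧ (rn : Int) + dr < (PySem.List.len grid) ∧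
            0 ≤ (cn : Int) + dc ∧ (cn : Int) + dc < (w : Int) then
           if PySem.List.pyGetD (PySem.List.pyGetD grid ((rn : Int) + dr) []) ((cn : Int) + dc) "" = "."
           then fc + 1 else fc
         else fc)
      = fc + (if dr = 0 ∧ dc = 0 then 0
              else pvIndFloor ((grid.getD ((rn : Int) + dr).toNat []).getD ((cn : Int) + dc).toNat "")) := by
    intro dr hdr dc hdc fc
    have hdr' : dr = -1 ∨ dr = 0 ∨ dr = 1 := by simpa using hdr
    have hdc' : dc = -1 ∨ dc = 0 ∨ dc = 1 := by simpa using hdc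
    by_cases hz : dr = 0 ∧ dc = 0
    · simp [hz]
    · rw [if_neg hz, if_neg hz]
      rw [if_pos (by simp only [PySem.List.len_eq]; omega)]
      rw [pvGet2 grid ((rn : Int) + dr) ((cn : Int) + dc) ((rn : Int) + dr).toNat ((cn : Int) + dc).toNat
            (by omega) (by omega)]
      exact pvStep fc _
  have hinner : ∀ (dr : Int), dr ∈ ([-1, 0, 1] : List Int) → ∀ (acc : Int),
      List.foldl (fun fc dc =>
        if dr = 0 ∧ dc = 0 then fc
        else
          if 0 ≤ (rn : Int) + dr ∧ (rn : Int) + dr < (PySem.List.len grid) ∧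
             0 ≤ (cn : Int) + dc ∧ (cn : Int) + dc < (w : Int) then
            if PySem.List.pyGetD (PySem.List.pyGetD grid ((rn : Int) + dr) []) ((cn : Int) + dc) "" = "."
            then fc + 1 else fc
          else fc) acc ([-1, 0, 1] : List Int)
      = acc + ((if dr = 0 ∧ (-1 : Int) = 0 then 0 else pvIndFloor ((grid.getD ((rn : Int) + dr).toNat []).getD ((cn : Int) + (-1)).toNat ""))
             + (if dr = 0 ∧ (0 : Int) = 0 then 0 else pvIndFloor ((grid.getD ((rn : Int) + dr).toNat []).getD ((cn : Int) + 0).toNat ""))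
             + (if dr = 0 ∧ (1 : Int) = 0 then 0 else pvIndFloor ((grid.getD ((rn : Int) + dr).toNat []).getD ((cn : Int) + 1).toNat ""))) := by
    intro dr hdr acc
    rw [PySem.List.foldl_congr_mem ([-1, 0, 1] : List Int) _
        (fun fc dc => fc + (if dr = 0 ∧ dc = 0 then 0
           else pvIndFloor ((grid.getD ((rn : Int) + dr).toNat []).getD ((cn : Int) + dc).toNat ""))) acc
        (fun fc dc hdc => hstep dr hdr dc hdc fc)]
    simp only [List.foldl_cons, List.foldl_nil]
    ring
  rw [PySem.List.foldl_congr_mem ([-1, 0, 1] : List Int) _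
      (fun acc dr => acc + ((if dr = 0 ∧ (-1 : Int) = 0 then 0 else pvIndFloor ((grid.getD ((rn : Int) + dr).toNat []).getD ((cn : Int) + (-1)).toNat ""))
             + (if dr = 0 ∧ (0 : Int) = 0 then 0 else pvIndFloor ((grid.getD ((rn : Int) + dr).toNat []).getD ((cn : Int) + 0).toNat ""))
             + (if dr = 0 ∧ (1 : Int) = 0 then 0 else pvIndFloor ((grid.getD ((rn : Int) + dr).toNat []).getD ((cn : Int) + 1).toNat "")))) 0
      (fun acc dr hdr => hinner dr hdr acc)]
  simp only [List.foldl_cons, List.foldl_nil]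
  have hA : ((rn : Int) + -1).toNat = rn - 1 := by omega
  have hB : ((rn : Int) + 0).toNat = rn := by omega
  have hC : ((rn : Int) + 1).toNat = rn + 1 := by omega
  have hD : ((cn : Int) + -1).toNat = cn - 1 := by omega
  have hE : ((cn : Int) + 0).toNat = cn := by omega
  have hF : ((cn : Int) + 1).toNat = cn + 1 := by omega
  rw [hA, hB, hC, hD, hE, hF]
  norm_num
  -- expand the prefix sums into the nine cell indicators
  have hS2 : ∀ b, pvSC grid (rn + 2) b
      = pvSC grid (rn - 1) b + pvRowS (grid.getD (rn - 1) []) b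
        + pvRowS (grid.getD rn []) b + pvRowS (grid.getD (rn + 1) []) b := by
    intro b
    have A2 := pvSC_succ grid (rn + 1) b (by omega)
    have A1 := pvSC_succ grid rn b (by omega)
    have A0 := pvSC_succ grid (rn - 1) b (by omega)
    have e : rn - 1 + 1 = rn := by omega
    rw [e] at A0
    have e' : rn + 1 + 1 = rn + 2 := by omega
    rw [e'] at A2
    linarith
  have hT : ∀ i, i < grid.length →
      pvRowS (grid.getD i []) (cn + 2)
        = pvRowS (grid.getD i []) (cn - 1)
          + pvIndFloor ((grid.getD i []).getD (cn - 1) "")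
          + pvIndFloor ((grid.getD i []).getD cn "")
          + pvIndFloor ((grid.getD i []).getD (cn + 1) "") := by
    intro i hi
    have hlen := hrl i hi
    have B0 := pvRowS_succ (grid.getD i []) (cn - 1) (by omega)
    have B1 := pvRowS_succ (grid.getD i []) cn (by omega)
    have B2 := pvRowS_succ (grid.getD i []) (cn + 1) (by omega)
    have e : cn - 1 + 1 = cn := by omega
    rw [e] at B0
    have e' : cn + 1 + 1 = cn + 2 := by omega
    rw [e'] at B2
    linarith
  have hcenter : pvIndFloor ((grid.getD rn []).getD cn "") = 0 := by
    rw [hwall]; rfl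
  rw [hS2 (cn + 2), hS2 (cn - 1),
      hT (rn - 1) (by omega), hT rn (by omega), hT (rn + 1) (by omega)]
  simp only [List.getD_eq_getElem?_getD] at *
  linarith

-- the whole passes agree: same loops, counts equal on interior wall cells
theorem pv_main (grid : List (List String)) :
    Pre_cellular_automata_pass_py grid →
    cellular_automata_pass_py grid = cellular_automata_pass_py_alt grid := by
  intro hpre
  simp only [cellular_automata_pass_py, cellular_automata_pass_py_alt]
  have hwidth : (if (PySem.List.len grid : Int) > 0 then PySem.List.len (PySem.List.pyGetD grid 0 []) else 0)
      = ((grid.headD []).length : Int) := by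
    cases grid with
    | nil => simp
    | cons r rs => simp [PySem.List.pyGetD_zero_cons]
  rw [hwidth]
  by_cases hh : grid.length ≤ 2
  · rw [show PySem.List.pyRange 1 ((PySem.List.len grid) - 1) 1 = [] from
        PySem.List.pyRange_one_eq_nil (by simp only [PySem.List.len_eq]; omega)]
    rfl
  · by_cases hw : (grid.headD []).length ≤ 2
    · rw [show PySem.List.pyRange 1 (((grid.headD []).length : Int) - 1) 1 = [] from
          PySem.List.pyRange_one_eq_nil (by omega)]
      simp only [List.foldl_nil]
    · have hrows : ∀ row ∈ grid, (grid.headD []).length ≤ row.length := by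
        rcases hpre with h | h | h
        · omega
        · omega
        · exact h
      have hrl : ∀ i, i < grid.length → (grid.headD []).length ≤ (grid.getD i []).length := by
        intro i hi
        have hg : grid.getD i [] = grid[i] := List.getD_eq_getElem _ _ hi
        rw [hg]; exact hrows _ (List.getElem_mem hi)
      apply PySem.List.foldl_congr_mem
      intro ng r hr
      obtain ⟨hr1, hr2⟩ := (PySem.List.mem_pyRange_one).1 hr
      rw [PySem.List.len_eq] at hr2
      apply PySem.List.foldl_congr_mem
      intro ng' c hc
      obtain ⟨hc1, hc2⟩ := (PySem.List.mem_pyRange_one).1 hc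
      have hrn : r = ((r.toNat : Nat) : Int) := by omega
      have hcn : c = ((c.toNat : Nat) : Int) := by omega
      by_cases hwall : PySem.List.pyGetD (PySem.List.pyGetD grid r []) c "" = "#"
      · simp only [hwall, ne_eq, not_true_eq_false, if_false]
        have hwall' : (grid.getD r.toNat []).getD c.toNat "" = "#" := by
          rw [← pvGet2 grid r c r.toNat c.toNat hrn hcn]
          exact hwall
        rw [hrn, hcn]
        rw [pvCount_eq grid (grid.headD []).length hrows r.toNat c.toNat
              (by omega) (by omega) (by omega) (by omega) hwall']
      · simp only [ne_eq, hwall, not_false_eq_true, if_true]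

-- ===== VERDICT (by name: the statement is the Claim_ definition above) =====
theorem cellular_automata_pass_py_spec : Claim_equal_cellular_automata_pass_py := by
  intro grid _ hpre
  unfold Spec_cellular_automata_pass_py
  exact pv_main grid hpre
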